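-- pv_equiv track=rewrite | github.com/sai-samarth/cpslp_assignment | synth_main.py | phones_to_diphones
-- ===== SOURCE A (Python) =====
-- def phones_to_diphones(phones):
--     """Convert a list of phones to diphones."""
--
--     diphones = []
--     for i in range(len(phones) - 1):
--         phone1 = phones[i].lower()
--         phone2 = phones[i + 1].lower()
--         diphone_phone1 = 'pau' if phone1 in ['pauc', 'pauo'] else phone1 # pauc is for comma and pauo is for other punctuation
--         diphone_phone2 = 'pau' if phone2 in ['pauc', 'pauo'] else phone2
--         diphone_name = diphone_phone1 + '-' + diphone_phone2
--         silence_duration = 0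
--         if phone2 in ['pauc', 'pauo']:
--             silence_duration = 200 if phone2 == 'pauc' else 400
--         diphones.append((diphone_name, silence_duration))
--
--     return diphones
-- ===== SOURCE B (Python) =====
-- def phones_to_diphones(phones):
--     """Convert a list of phones to diphones."""
--     if len(phones) < 2:
--         return []
--
--     def norm(p):
--         p = p.lower()
--         if p == 'pauc':
--             return ('pau', 200)
--         if p == 'pauo':
--             return ('pau', 400)
--         return (p, 0)
--
--     # single backward pass: carry the normalized name/duration of the successor
--     out = []
--     nxt_name, nxt_dur = norm(phones[-1])
--     for raw in reversed(phones[:-1]):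
--         cur_name, cur_dur = norm(raw)
--         out.append((cur_name + '-' + nxt_name, nxt_dur))
--         nxt_name, nxt_dur = cur_name, cur_dur
--     out.reverse()
--     return out
-- ===== Notes on version B (the rewrite author's own statement) =====
-- stated objective: alternative
-- what changed: Replaces A's forward index loop that re-reads and re-normalizes both phones of every pair with a single backward pass carrying the successor's already-normalized name and duration in an accumulator (each phone is normalized once), building the output in reverse and flipping it at the end.
import Mathlib
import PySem

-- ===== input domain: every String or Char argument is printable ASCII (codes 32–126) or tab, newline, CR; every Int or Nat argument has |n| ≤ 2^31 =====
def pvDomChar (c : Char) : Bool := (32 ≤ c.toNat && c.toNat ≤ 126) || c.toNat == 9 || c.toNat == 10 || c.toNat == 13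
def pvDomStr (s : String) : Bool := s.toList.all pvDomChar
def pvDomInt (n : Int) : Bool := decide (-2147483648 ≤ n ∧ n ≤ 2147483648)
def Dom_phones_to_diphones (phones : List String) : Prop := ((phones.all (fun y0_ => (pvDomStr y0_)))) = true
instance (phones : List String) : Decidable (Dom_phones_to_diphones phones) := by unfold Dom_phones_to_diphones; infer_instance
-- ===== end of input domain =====

-- B replaces A's forward index loop (which normalizes both phones of every pair) by one backward
-- pass carrying the successor's normalized name/duration, reversing the output once; same cost.

-- ===== PORT A =====
-- 'for i in range(len(phones)-1)': indices i and i+1 are always in range here, so pyGetD is exact.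
def phones_to_diphones (phones : List String) : List (String × Int) :=
  (PySem.List.pyRange 0 ((phones.length : Int) - 1) 1).foldl
    (fun diphones i =>
      let phone1 := PySem.Str.lower (PySem.List.pyGetD phones i "")
      let phone2 := PySem.Str.lower (PySem.List.pyGetD phones (i + 1) "")
      let diphone_phone1 := if phone1 = "pauc" ∨ phone1 = "pauo" then "pau" else phone1
      let diphone_phone2 := if phone2 = "pauc" ∨ phone2 = "pauo" then "pau" else phone2
      let diphone_name := diphone_phone1 ++ "-" ++ diphone_phone2
      let silence_duration : Int :=
        if phone2 = "pauc" ∨ phone2 = "pauo" then (if phone2 = "pauc" then 200 else 400) else 0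
      diphones ++ [(diphone_name, silence_duration)]) []

-- ===== PORT B =====
-- Source B's norm helper
def pvNorm (p : String) : String × Int :=
  let q := PySem.Str.lower p
  if q = "pauc" then ("pau", 200)
  else if q = "pauo" then ("pau", 400)
  else (q, 0)

-- Source B's loop body: state = (out so far, successor's normalized name, successor's duration)
def pvStep (st : List (String × Int) × String × Int) (raw : String) :
    List (String × Int) × String × Int :=
  let c := pvNorm raw
  (st.1 ++ [(c.1 ++ "-" ++ st.2.1, st.2.2)], c.1, c.2)

def phones_to_diphones_alt (phones : List String) : List (String × Int) :=
  if phones.length < 2 then []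
  else
    let n := pvNorm (PySem.List.pyGetD phones (-1) "")        -- norm(phones[-1])
    let r := ((PySem.List.slice phones none (some (-1))).reverse).foldl pvStep ([], n.1, n.2)
    r.1.reverse

-- ===== PRECONDITION & SPEC =====
def Spec_phones_to_diphones (phones : List String) (out : List (String × Int)) : Prop := out = phones_to_diphones_alt phones
instance (phones : List String) (out : List (String × Int)) : Decidable (Spec_phones_to_diphones phones out) := by unfold Spec_phones_to_diphones; infer_instance

-- ===== CLAIM (what is proved, stated in full; the proofs are below) =====
def Claim_equal_phones_to_diphones : Prop := ∀ (phones : List String), Dom_phones_to_diphones phones → Spec_phones_to_diphones phones (phones_to_diphones phones)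

-- ===== LEMMAS AND PROOFS =====

-- the per-pair body of A's loop, abstracted over the two raw phones it reads
def pvCombine (p1 p2 : String) : String × Int :=
  let phone1 := PySem.Str.lower p1
  let phone2 := PySem.Str.lower p2
  let diphone_phone1 := if phone1 = "pauc" ∨ phone1 = "pauo" then "pau" else phone1
  let diphone_phone2 := if phone2 = "pauc" ∨ phone2 = "pauo" then "pau" else phone2
  (diphone_phone1 ++ "-" ++ diphone_phone2,
    if phone2 = "pauc" ∨ phone2 = "pauo" then (if phone2 = "pauc" then (200:Int) else 400) else 0)

theorem pvCombine_norm (p1 p2 : String) :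
    pvCombine p1 p2 = ((pvNorm p1).1 ++ "-" ++ (pvNorm p2).1, (pvNorm p2).2) := by
  simp only [pvCombine, pvNorm]
  split_ifs with h1 h2 h3 h4 h5 h6 h7 h8 <;> simp_all

-- adjacent-pair indexing over range(len-1) is combining a list with its tail
theorem pair_range_zip {α β : Type} (xs : List α) (d : α) (g : α → α → β) :
    (List.range (xs.length - 1)).map (fun k => g (xs.getD k d) (xs.getD (k+1) d)) =
      (xs.zip xs.tail).map (fun p => g p.1 p.2) := by
  induction xs with
  | nil => simp
  | cons x xs ih =>
    cases xs with
    | nil => simp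
    | cons y t =>
      simp only [List.length_cons, Nat.add_sub_cancel, List.range_succ_eq_map, List.map_cons,
        List.map_map, List.tail_cons, List.zip_cons_cons, List.getD_cons_zero, List.getD_cons_succ]
      congr 1

-- A's loop, as a map over the zip
theorem portA_as_zip (xs : List String) :
    phones_to_diphones xs = (xs.zip xs.tail).map (fun p => pvCombine p.1 p.2) := by
  unfold phones_to_diphones
  rw [PySem.List.foldl_append_singleton_eq_map, PySem.List.pyRange_one]
  rw [List.map_map]
  have hn : (((xs.length : Int) - 1) - 0).toNat = xs.length - 1 := by omega
  rw [hn, ← pair_range_zip xs "" (fun a b => pvCombine a b)]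
  refine List.map_congr_left (fun k hk => ?_)
  have hk' : k < xs.length - 1 := List.mem_range.mp hk
  simp only [Function.comp_apply, zero_add]
  have h1 : PySem.List.pyGetD xs (k : Int) "" = xs.getD k "" := by
    simp [PySem.List.pyGetD_natCast, List.getD_eq_getElem?_getD]
  have h2 : PySem.List.pyGetD xs ((k : Int) + 1) "" = xs.getD (k+1) "" := by
    have := PySem.List.pyGetD_natCast xs (k+1) ""
    push_cast at this
    rw [this]
  simp only [h1, h2, pvCombine]

-- forward specification of B's backward loop
def pvT : List String → String × Int → List (String × Int)
  | [], _ => []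
  | x :: ys, m =>
    let nxt := match ys with | [] => m | y :: _ => pvNorm y
    ((pvNorm x).1 ++ "-" ++ nxt.1, nxt.2) :: pvT ys m

theorem fold_inv (ys : List String) (m : String × Int) :
    ys.reverse.foldl pvStep ([], m.1, m.2) =
      ((pvT ys m).reverse, (match ys with | [] => m | y :: _ => pvNorm y)) := by
  induction ys generalizing m with
  | nil => simp [pvT]
  | cons x ys ih =>
    simp only [List.reverse_cons, List.foldl_append, List.foldl_cons, List.foldl_nil]
    rw [ih m]
    cases ys with
    | nil => simp [pvStep, pvT]
    | cons y t => simp [pvStep, pvT]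

theorem pvT_zip (init : List String) (last : String) :
    pvT init (pvNorm last) =
      ((init ++ [last]).zip ((init ++ [last]).tail)).map (fun p => pvCombine p.1 p.2) := by
  induction init with
  | nil => simp [pvT]
  | cons x init ih =>
    cases init with
    | nil => simp [pvT, pvCombine_norm]
    | cons y t =>
      simp only [List.cons_append, List.tail_cons, List.zip_cons_cons, List.map_cons] at *
      rw [pvT, ih]
      simp [pvCombine_norm]

theorem portB_as_zip (xs : List String) :
    phones_to_diphones_alt xs = (xs.zip xs.tail).map (fun p => pvCombine p.1 p.2) := by
  unfold phones_to_diphones_alt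
  by_cases h : xs.length < 2
  · rw [if_pos h]
    match xs, h with
    | [], _ => rfl
    | [x], _ => rfl
  · rw [if_neg h]
    have hne : xs ≠ [] := by rintro rfl; simp at h
    rw [PySem.List.slice_to_neg_one, PySem.List.pyGetD_neg_one (h := hne)]
    show ((xs.dropLast.reverse.foldl pvStep
        ([], (pvNorm (xs.getLast hne)).1, (pvNorm (xs.getLast hne)).2)).1).reverse = _
    rw [fold_inv, pvT_zip, List.dropLast_concat_getLast hne]
    simp

-- ===== VERDICT (by name: the statement is the Claim_ definition above) =====
theorem phones_to_diphones_spec : Claim_equal_phones_to_diphones := by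
  intro phones _
  unfold Spec_phones_to_diphones
  rw [portA_as_zip, portB_as_zip]
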